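-- pv_equiv track=rewrite | github.com/h3x89/hackerrank | codesignal/92.2.3.py | solution
-- ===== SOURCE A (Python) =====
-- def solution(input_string):
--     result = []
--     i = 0
--     while i < len(input_string):
--         # If we find a digit
--         if input_string[i].isdigit():
--             num = ''
--             # Get the complete number
--             while i < len(input_string) and input_string[i].isdigit():
--                 num += input_string[i]
--                 i += 1
--
--             # Skip any non-letter characters
--             while i < len(input_string) and not input_string[i].isalpha():
--                 i += 1
--
--             # Get the first letter after the number
--             if i < len(input_string):
--                 letter = input_string[i]
--                 result.append(letter + num)
--                 i += 1
--         else: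
--             result.append(input_string[i])
--             i += 1
--
--     return ''.join(result)
-- ===== SOURCE B (Python) =====
-- def solution(input_string):
--     # single-pass state machine: 0 = normal, 1 = collecting a digit run,
--     # 2 = digit run done, waiting for the first letter
--     out = ''
--     state = 0
--     num = ''
--     for c in input_string:
--         if state == 0:
--             if c.isdigit():
--                 num = c
--                 state = 1
--             else:
--                 out += c
--         elif state == 1:
--             if c.isdigit():
--                 num += c
--             elif c.isalpha():
--                 out += c + num
--                 state = 0
--             else:
--                 state = 2
--         else:
--             if c.isalpha():
--                 out += c + num
--                 state = 0
--     return out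
-- ===== Notes on version B (the rewrite author's own statement) =====
-- stated objective: alternative
-- what changed: A's index-based while loop with two nested sub-loops (collect digit run, skip non-letters, grab letter) is replaced by a single left-to-right fold over the characters driving a three-state machine (normal / collecting digits / waiting for a letter) with a pending-number buffer.
import Mathlib
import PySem

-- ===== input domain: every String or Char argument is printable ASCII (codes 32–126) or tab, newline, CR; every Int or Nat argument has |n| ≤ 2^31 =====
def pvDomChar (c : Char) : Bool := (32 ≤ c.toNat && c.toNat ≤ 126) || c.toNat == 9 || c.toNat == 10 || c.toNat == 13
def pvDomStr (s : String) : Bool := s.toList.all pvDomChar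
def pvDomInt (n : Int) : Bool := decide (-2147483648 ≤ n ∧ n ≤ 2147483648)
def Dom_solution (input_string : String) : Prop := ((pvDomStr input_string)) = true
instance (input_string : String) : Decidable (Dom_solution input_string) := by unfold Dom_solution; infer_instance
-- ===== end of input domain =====

-- B replaces A's index-based loop with nested sub-loops by a single-pass three-state
-- machine folded over the characters (objective: alternative decomposition, same cost).


-- ===== PORT A =====
-- inner while: "while i < len and s[i].isdigit(): num += s[i]; i += 1"  → (num, rest)
def solA_num : List Char → List Char × List Char
  | [] => ([], [])
  | c :: t =>
    if PySem.Chars.isdigit c then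
      let p := solA_num t
      (c :: p.1, p.2)
    else ([], c :: t)

-- inner while: "while i < len and not s[i].isalpha(): i += 1"
def solA_skip : List Char → List Char
  | [] => []
  | c :: t => if !(PySem.Chars.isalpha c) then solA_skip t else c :: t

theorem solA_num_snd_len : ∀ l : List Char, (solA_num l).2.length ≤ l.length := by
  intro l; induction l with
  | nil => simp [solA_num]
  | cons c t ih =>
    simp only [solA_num]
    split
    · simpa using Nat.le_succ_of_le ih
    · simp

theorem solA_skip_len : ∀ l : List Char, (solA_skip l).length ≤ l.length := by
  intro l; induction l with
  | nil => simp [solA_skip]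
  | cons c t ih =>
    simp only [solA_skip]
    split
    · exact Nat.le_succ_of_le ih
    · simp

-- outer while loop of A, recursion on the remaining suffix
def solA_loop : List Char → List Char
  | [] => []
  | c :: t =>
    if PySem.Chars.isdigit c then
      let p := solA_num t            -- num = c :: p.1
      let r2 := solA_skip p.2
      match _h : r2 with
      | [] => []
      | l :: r3 => l :: (c :: p.1) ++ solA_loop r3
    else c :: solA_loop t
  termination_by l => l.length
  decreasing_by
  · have h1 := solA_num_snd_len t
    have h2 := solA_skip_len (solA_num t).2
    have h' : solA_skip (solA_num t).2 = l :: r3 := _h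
    rw [h'] at h2
    simp only [List.length_cons] at h2 ⊢
    omega
  · simp

def solution (input_string : String) : String :=
  String.ofList (solA_loop input_string.toList)

-- ===== PORT B =====
-- one fold step of the state machine: state 0 = normal, 1 = collecting digits,
-- 2 = digit run done, waiting for the first letter
def solB_step : (List Char × Nat × List Char) → Char → (List Char × Nat × List Char)
  | (out, state, num), c =>
    if state = 0 then
      if PySem.Chars.isdigit c then (out, 1, [c]) else (out ++ [c], 0, num)
    else if state = 1 then
      if PySem.Chars.isdigit c then (out, 1, num ++ [c])
      else if PySem.Chars.isalpha c then (out ++ c :: num, 0, num)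
      else (out, 2, num)
    else
      if PySem.Chars.isalpha c then (out ++ c :: num, 0, num) else (out, 2, num)

def solution_alt (input_string : String) : String :=
  String.ofList (input_string.toList.foldl solB_step ([], 0, [])).1

-- ===== PRECONDITION & SPEC =====
def Spec_solution (input_string : String) (out : String) : Prop := out = solution_alt input_string
instance (input_string : String) (out : String) : Decidable (Spec_solution input_string out) := by unfold Spec_solution; infer_instance

-- ===== CLAIM (what is proved, stated in full; the proofs are below) =====
def Claim_equal_solution : Prop := ∀ (input_string : String), Dom_solution input_string → Spec_solution input_string (solution input_string)

-- ===== LEMMAS AND PROOFS =====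

-- combined invariant for the three machine states, by strong induction on the suffix length
theorem solB_states (n : Nat) :
    ∀ l : List Char, l.length ≤ n → ∀ out num : List Char,
      (l.foldl solB_step (out, 0, num)).1 = out ++ solA_loop l
      ∧ (l.foldl solB_step (out, 2, num)).1 =
          (match solA_skip l with
           | [] => out
           | c :: t => out ++ c :: num ++ solA_loop t)
      ∧ (l.foldl solB_step (out, 1, num)).1 =
          (match solA_skip (solA_num l).2 with
           | [] => out
           | c :: t => out ++ c :: (num ++ (solA_num l).1) ++ solA_loop t) := by
  induction n with
  | zero =>
    intro l hl out num
    have : l = [] := List.length_eq_zero_iff.mp (Nat.le_zero.mp hl)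
    subst this
    simp [solA_loop, solA_skip, solA_num]
  | succ n ih =>
    intro l hl out num
    cases l with
    | nil => simp [solA_loop, solA_skip, solA_num]
    | cons c t =>
      have ht : t.length ≤ n := by simpa using hl
      refine ⟨?_, ?_, ?_⟩
      · -- state 0
        by_cases hd : PySem.Chars.isdigit c = true
        · have h1 := (ih t ht out [c]).2.2
          simp only [List.foldl_cons, solB_step]
          norm_num [hd]
          rw [h1]
          simp only [solA_loop, hd, if_true]
          cases hs : solA_skip (solA_num t).2 with
          | nil => simp
          | cons c' t' => simp
        · have h0 := (ih t ht (out ++ [c]) num).1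
          simp only [List.foldl_cons, solB_step]
          norm_num [hd]
          rw [h0]
          simp [solA_loop, hd]
      · -- state 2
        by_cases ha : PySem.Chars.isalpha c = true
        · have h0 := (ih t ht (out ++ c :: num) num).1
          simp only [List.foldl_cons, solB_step]
          norm_num [ha]
          rw [h0]
          simp [solA_skip, ha]
        · have h2 := (ih t ht out num).2.1
          simp only [List.foldl_cons, solB_step]
          norm_num [ha]
          rw [h2]
          have hs : solA_skip (c :: t) = solA_skip t := by simp [solA_skip, ha]
          rw [hs]
          cases solA_skip t <;> simp
      · -- state 1
        by_cases hd : PySem.Chars.isdigit c = true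
        · have h1 := (ih t ht out (num ++ [c])).2.2
          simp only [List.foldl_cons, solB_step]
          norm_num [hd]
          rw [h1]
          simp only [solA_num, hd, if_true]
          cases hs : solA_skip (solA_num t).2 with
          | nil => simp
          | cons c' t' => simp
        · by_cases ha : PySem.Chars.isalpha c = true
          · have h0 := (ih t ht (out ++ c :: num) num).1
            simp only [List.foldl_cons, solB_step]
            norm_num [hd, ha]
            rw [h0]
            simp [solA_num, solA_skip, hd, ha]
          · have h2 := (ih t ht out num).2.1
            simp only [List.foldl_cons, solB_step]
            norm_num [hd, ha]
            rw [h2]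
            have h1 : (solA_num (c :: t)).2 = c :: t := by simp [solA_num, hd]
            have hs : solA_skip (c :: t) = solA_skip t := by simp [solA_skip, ha]
            have h0 : (solA_num (c :: t)).1 = [] := by simp [solA_num, hd]
            rw [h1, hs]
            cases solA_skip t <;> simp [h0]

-- ===== VERDICT (by name: the statement is the Claim_ definition above) =====
theorem solution_spec : Claim_equal_solution := by
  intro s _
  unfold Spec_solution solution solution_alt
  have h := (solB_states s.toList.length s.toList le_rfl [] []).1
  rw [h]
  simp
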